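-- pv_equiv track=rewrite | github.com/Kawser-nerd/CLCDSA | Source Codes/AtCoder/arc094/D/3141878.py | solve
-- ===== SOURCE A (Python) =====
-- def solve(s):
--     if all(a == b for a, b in zip(s, s[1:])):
--         return 1
--     if len(s) == 2:
--         return 2
--     elif len(s) == 3:
--         if s[0] == s[1] or s[1] == s[2]:
--             return 6
--         elif s[0] == s[2]:
--             return 7
--         else:
--             return 3
--     # dp[has succession=0][mod 3][last char], dp[has succession=1][mod 3]
--     dp = [[[0] * 3 for _ in range(3)], [0] * 3]
--     dp[0][0][0] = 1
--     dp[0][1][1] = 1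
--     dp[0][2][2] = 1
--     MOD = 998244353
--     for _ in range(len(s) - 1):
--         ndp = [[[0] * 3 for _ in range(3)], [0] * 3]
--         dp0, dp1 = dp
--         ndp0, ndp1 = ndp
--         sdp1 = sum(dp1)
--         ndp0[0][0] = (dp0[0][1] + dp0[0][2]) % MOD
--         ndp0[1][0] = (dp0[1][1] + dp0[1][2]) % MOD
--         ndp0[2][0] = (dp0[2][1] + dp0[2][2]) % MOD
--         ndp0[0][1] = (dp0[2][0] + dp0[2][2]) % MOD
--         ndp0[1][1] = (dp0[0][0] + dp0[0][2]) % MOD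
--         ndp0[2][1] = (dp0[1][0] + dp0[1][2]) % MOD
--         ndp0[0][2] = (dp0[1][0] + dp0[1][1]) % MOD
--         ndp0[1][2] = (dp0[2][0] + dp0[2][1]) % MOD
--         ndp0[2][2] = (dp0[0][0] + dp0[0][1]) % MOD
--         ndp1[0] = (dp0[0][0] + dp0[1][2] + dp0[2][1] + sdp1) % MOD
--         ndp1[1] = (dp0[1][0] + dp0[2][2] + dp0[0][1] + sdp1) % MOD
--         ndp1[2] = (dp0[2][0] + dp0[0][2] + dp0[1][1] + sdp1) % MOD
--         dp = ndp
--     return (dp[1][sum(map(ord, s)) % 3] + all(a != b for a, b in zip(s, s[1:]))) % MOD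
-- ===== SOURCE B (Python) =====
-- def solve(s):
--     # Closed form: for len(s) >= 4 the linear DP has the solution
--     # 3^m - 2^m (m = len(s)-1) with a +/- 2^((m-2)//3) correction when m % 3 == 2,
--     # computed with modular exponentiation instead of the O(n) DP loop.
--     if all(a == b for a, b in zip(s, s[1:])):
--         return 1
--     if len(s) == 2:
--         return 2
--     if len(s) == 3:
--         if s[0] == s[1] or s[1] == s[2]:
--             return 6
--         if s[0] == s[2]:
--             return 7
--         return 3
--     MOD = 998244353
--     m = len(s) - 1
--     res = pow(3, m, MOD) - pow(2, m, MOD)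
--     if m % 3 == 2:
--         t = pow(2, (m - 2) // 3, MOD)
--         res += -2 * t if sum(map(ord, s)) % 3 == 0 else t
--     if all(a != b for a, b in zip(s, s[1:])):
--         res += 1
--     return res % MOD
-- ===== Notes on version B (the rewrite author's own statement) =====
-- stated objective: faster
-- what changed: Replaces A's O(n) 12-state DP loop with the closed form 3^m - 2^m (m = len(s)-1) plus a power-of-two correction depending on m mod 3 and sum(ord)%3, evaluated with built-in modular exponentiation.
import Mathlib
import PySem

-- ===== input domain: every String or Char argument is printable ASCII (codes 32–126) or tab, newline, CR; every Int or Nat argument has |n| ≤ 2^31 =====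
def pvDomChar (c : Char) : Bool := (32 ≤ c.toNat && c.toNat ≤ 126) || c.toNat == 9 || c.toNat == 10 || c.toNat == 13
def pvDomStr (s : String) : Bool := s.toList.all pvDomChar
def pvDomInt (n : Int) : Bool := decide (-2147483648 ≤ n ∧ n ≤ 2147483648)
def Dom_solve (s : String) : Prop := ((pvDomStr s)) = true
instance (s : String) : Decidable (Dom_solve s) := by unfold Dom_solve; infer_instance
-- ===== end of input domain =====

-- B replaces A's O(n) 12-state DP loop by the closed form 3^m - 2^m (plus a power-of-two
-- correction when m % 3 == 2, m = len(s)-1) via modular exponentiation: objective = faster.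

-- ===== PORT A =====
-- all(a == b for a, b in zip(s, s[1:]))
def pyAllEqAdj : List Char → Bool
  | a :: b :: t => (a == b) && pyAllEqAdj (b :: t)
  | _ => true

-- all(a != b for a, b in zip(s, s[1:]))
def pyAllNeAdj : List Char → Bool
  | a :: b :: t => (a != b) && pyAllNeAdj (b :: t)
  | _ => true

-- sum(map(ord, s))
def sumOrds (cs : List Char) : Int := (cs.map (fun c => (c.toNat : Int))).sum

def MODI : Int := 998244353

-- the 12 dp cells: aIJ = dp[0][I][J], bK = dp[1][K]
structure DpS where
  a00 : Int
  a01 : Int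
  a02 : Int
  a10 : Int
  a11 : Int
  a12 : Int
  a20 : Int
  a21 : Int
  a22 : Int
  b0 : Int
  b1 : Int
  b2 : Int
deriving Repr, DecidableEq

def dpInit : DpS := ⟨1, 0, 0, 0, 1, 0, 0, 0, 1, 0, 0, 0⟩

-- one iteration of A's loop body
def stepA (d : DpS) : DpS :=
  let sdp1 := d.b0 + d.b1 + d.b2
  { a00 := PySem.Int.mod (d.a01 + d.a02) MODI
    a10 := PySem.Int.mod (d.a11 + d.a12) MODI
    a20 := PySem.Int.mod (d.a21 + d.a22) MODI
    a01 := PySem.Int.mod (d.a20 + d.a22) MODI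
    a11 := PySem.Int.mod (d.a00 + d.a02) MODI
    a21 := PySem.Int.mod (d.a10 + d.a12) MODI
    a02 := PySem.Int.mod (d.a10 + d.a11) MODI
    a12 := PySem.Int.mod (d.a20 + d.a21) MODI
    a22 := PySem.Int.mod (d.a00 + d.a01) MODI
    b0 := PySem.Int.mod (d.a00 + d.a12 + d.a21 + sdp1) MODI
    b1 := PySem.Int.mod (d.a10 + d.a22 + d.a01 + sdp1) MODI
    b2 := PySem.Int.mod (d.a20 + d.a02 + d.a11 + sdp1) MODI }

def solve (s : String) : Int :=
  let cs := s.toList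
  if pyAllEqAdj cs then 1
  else if cs.length = 2 then 2
  else if cs.length = 3 then
    (if cs.getD 0 ' ' == cs.getD 1 ' ' || cs.getD 1 ' ' == cs.getD 2 ' ' then 6
     else if cs.getD 0 ' ' == cs.getD 2 ' ' then 7
     else 3)
  else
    let dp := (List.range (cs.length - 1)).foldl (fun d _ => stepA d) dpInit
    let k := PySem.Int.mod (sumOrds cs) 3
    let v := if k = 0 then dp.b0 else if k = 1 then dp.b1 else dp.b2
    PySem.Int.mod (v + (if pyAllNeAdj cs then 1 else 0)) MODI

-- ===== PORT B =====
def solve_alt (s : String) : Int :=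
  let cs := s.toList
  if pyAllEqAdj cs then 1
  else if cs.length = 2 then 2
  else if cs.length = 3 then
    (if cs.getD 0 ' ' == cs.getD 1 ' ' || cs.getD 1 ' ' == cs.getD 2 ' ' then 6
     else if cs.getD 0 ' ' == cs.getD 2 ' ' then 7
     else 3)
  else
    let m := cs.length - 1
    let res := PySem.Int.powMod 3 m MODI - PySem.Int.powMod 2 m MODI
    let res := if m % 3 = 2 then
        res + (if PySem.Int.mod (sumOrds cs) 3 = 0 then
                 -2 * PySem.Int.powMod 2 ((m - 2) / 3) MODI
               else PySem.Int.powMod 2 ((m - 2) / 3) MODI)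
      else res
    let res := if pyAllNeAdj cs then res + 1 else res
    PySem.Int.mod res MODI

-- ===== PRECONDITION & SPEC =====
def Spec_solve (s : String) (out : Int) : Prop := out = solve_alt s
instance (s : String) (out : Int) : Decidable (Spec_solve s out) := by unfold Spec_solve; infer_instance

-- ===== CLAIM (what is proved, stated in full; the proofs are below) =====
def Claim_equal_solve : Prop := ∀ (s : String), Dom_solve s → Spec_solve s (solve s)

-- ===== LEMMAS AND PROOFS =====

abbrev Zp := ZMod 998244353

-- the dp state mapped into ZMod 998244353
structure DpZ where
  a00 : Zp
  a01 : Zp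
  a02 : Zp
  a10 : Zp
  a11 : Zp
  a12 : Zp
  a20 : Zp
  a21 : Zp
  a22 : Zp
  b0 : Zp
  b1 : Zp
  b2 : Zp

def dpToZ (d : DpS) : DpZ :=
  ⟨(d.a00 : Zp), (d.a01 : Zp), (d.a02 : Zp), (d.a10 : Zp), (d.a11 : Zp), (d.a12 : Zp),
   (d.a20 : Zp), (d.a21 : Zp), (d.a22 : Zp), (d.b0 : Zp), (d.b1 : Zp), (d.b2 : Zp)⟩

def stepZ (z : DpZ) : DpZ :=
  let sdp1 := z.b0 + z.b1 + z.b2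
  { a00 := z.a01 + z.a02
    a10 := z.a11 + z.a12
    a20 := z.a21 + z.a22
    a01 := z.a20 + z.a22
    a11 := z.a00 + z.a02
    a21 := z.a10 + z.a12
    a02 := z.a10 + z.a11
    a12 := z.a20 + z.a21
    a22 := z.a00 + z.a01
    b0 := z.a00 + z.a12 + z.a21 + sdp1
    b1 := z.a10 + z.a22 + z.a01 + sdp1
    b2 := z.a20 + z.a02 + z.a11 + sdp1 }

-- inverse of 3 modulo 998244353
def u3 : Zp := 332748118

lemma u3_mul : (3 : Zp) * u3 = 1 := by
  have h2 : ((998244353 : ℕ) : Zp) = 0 := ZMod.natCast_self 998244353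
  have h : (3 : Zp) * u3 = ((998244353 : ℕ) : Zp) + 1 := by
    unfold u3; push_cast; norm_num
  rw [h, h2, zero_add]

-- closed-form state after 3q, 3q+1, 3q+2 steps
def Z0 (q : ℕ) : DpZ :=
  let t : Zp := 2 ^ q
  let A := u3 * (t ^ 3 + 2 * t)
  let B := u3 * (t ^ 3 - t)
  let V : Zp := 27 ^ q - t ^ 3
  ⟨A, B, B, B, A, B, B, B, A, V, V, V⟩

def Z1 (q : ℕ) : DpZ :=
  let t : Zp := 2 ^ q
  let A := u3 * (2 * t ^ 3 + t)
  let B := u3 * (2 * t ^ 3 - 2 * t)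
  let V : Zp := 3 * 27 ^ q - 2 * t ^ 3
  ⟨B, A, A, A, A, B, A, B, A, V, V, V⟩

def Z2 (q : ℕ) : DpZ :=
  let t : Zp := 2 ^ q
  let A := u3 * (4 * t ^ 3 + 2 * t)
  let B := u3 * (4 * t ^ 3 - t)
  ⟨A, A, A, B, B, B, B, B, B,
   9 * 27 ^ q - 4 * t ^ 3 - 2 * t, 9 * 27 ^ q - 4 * t ^ 3 + t, 9 * 27 ^ q - 4 * t ^ 3 + t⟩

lemma stepZ_Z0 (q : ℕ) : stepZ (Z0 q) = Z1 q := by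
  simp only [stepZ, Z0, Z1, DpZ.mk.injEq]
  refine ⟨?_, ?_, ?_, ?_, ?_, ?_, ?_, ?_, ?_, ?_, ?_, ?_⟩
  · ring
  · ring
  · ring
  · ring
  · ring
  · ring
  · ring
  · ring
  · ring
  · linear_combination ((2 : Zp) ^ q) ^ 3 * u3_mul
  · linear_combination ((2 : Zp) ^ q) ^ 3 * u3_mul
  · linear_combination ((2 : Zp) ^ q) ^ 3 * u3_mul

lemma stepZ_Z1 (q : ℕ) : stepZ (Z1 q) = Z2 q := by
  simp only [stepZ, Z1, Z2, DpZ.mk.injEq]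
  refine ⟨?_, ?_, ?_, ?_, ?_, ?_, ?_, ?_, ?_, ?_, ?_, ?_⟩
  · ring
  · ring
  · ring
  · ring
  · ring
  · ring
  · ring
  · ring
  · ring
  · linear_combination (2 * ((2 : Zp) ^ q) ^ 3 - 2 * (2 : Zp) ^ q) * u3_mul
  · linear_combination (2 * ((2 : Zp) ^ q) ^ 3 + (2 : Zp) ^ q) * u3_mul
  · linear_combination (2 * ((2 : Zp) ^ q) ^ 3 + (2 : Zp) ^ q) * u3_mul

lemma stepZ_Z2 (q : ℕ) : stepZ (Z2 q) = Z0 (q + 1) := by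
  simp only [stepZ, Z2, Z0, DpZ.mk.injEq]
  refine ⟨?_, ?_, ?_, ?_, ?_, ?_, ?_, ?_, ?_, ?_, ?_, ?_⟩
  · ring
  · ring
  · ring
  · ring
  · ring
  · ring
  · ring
  · ring
  · ring
  · linear_combination (4 * ((2 : Zp) ^ q) ^ 3) * u3_mul
  · linear_combination (4 * ((2 : Zp) ^ q) ^ 3) * u3_mul
  · linear_combination (4 * ((2 : Zp) ^ q) ^ 3) * u3_mul

lemma zInit_eq : dpToZ dpInit = Z0 0 := by
  simp only [dpToZ, dpInit, Z0, DpZ.mk.injEq]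
  norm_num
  linear_combination -u3_mul

lemma castmod (x : Int) : ((PySem.Int.mod x MODI : Int) : Zp) = (x : Zp) := by
  rw [PySem.Int.mod_eq_emod_of_pos (a := x) (b := MODI) (by unfold MODI; norm_num)]
  have hd : x % MODI = x - MODI * (x / MODI) := by
    have := Int.emod_add_ediv x MODI
    omega
  rw [hd]
  push_cast
  have hM : ((MODI : Int) : Zp) = 0 := by
    have : ((998244353 : ℕ) : Zp) = 0 := ZMod.natCast_self 998244353
    unfold MODI
    push_cast at this ⊢
    exact this
  rw [hM]
  ring

lemma powMod_cast (b : Int) (e : ℕ) :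
    ((PySem.Int.powMod b e MODI : Int) : Zp) = (b : Zp) ^ e := by
  rw [PySem.Int.powMod_eq, castmod]
  push_cast
  ring

lemma toZ_stepA (d : DpS) : dpToZ (stepA d) = stepZ (dpToZ d) := by
  simp only [dpToZ, stepA, stepZ, castmod, DpZ.mk.injEq]
  refine ⟨?_, ?_, ?_, ?_, ?_, ?_, ?_, ?_, ?_, ?_, ?_, ?_⟩ <;> (push_cast; ring)

lemma toZ_iter (n : ℕ) (d : DpS) : dpToZ (stepA^[n] d) = stepZ^[n] (dpToZ d) := by
  induction n with
  | zero => rfl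
  | succ n ih => rw [Function.iterate_succ_apply', Function.iterate_succ_apply', toZ_stepA, ih]

lemma foldl_stepA (n : ℕ) (d : DpS) :
    (List.range n).foldl (fun d _ => stepA d) d = stepA^[n] d := by
  induction n with
  | zero => rfl
  | succ n ih =>
    rw [List.range_succ, List.foldl_append, ih, Function.iterate_succ_apply']
    simp [List.foldl]

lemma iterZ_formula (q : ℕ) :
    stepZ^[3 * q] (dpToZ dpInit) = Z0 q ∧
    stepZ^[3 * q + 1] (dpToZ dpInit) = Z1 q ∧
    stepZ^[3 * q + 2] (dpToZ dpInit) = Z2 q := by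
  induction q with
  | zero =>
    refine ⟨by simpa using zInit_eq, ?_, ?_⟩
    · rw [show 3 * 0 + 1 = 1 by rfl, Function.iterate_one, zInit_eq, stepZ_Z0]
    · rw [show 3 * 0 + 2 = 2 by rfl,
        show stepZ^[2] (dpToZ dpInit) = stepZ (stepZ (dpToZ dpInit)) from rfl,
        zInit_eq, stepZ_Z0, stepZ_Z1]
  | succ q ih =>
    obtain ⟨h0, h1, h2⟩ := ih
    have h3 : stepZ^[3 * (q + 1)] (dpToZ dpInit) = Z0 (q + 1) := by
      rw [show 3 * (q + 1) = (3 * q + 2) + 1 by ring, Function.iterate_succ_apply', h2, stepZ_Z2]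
    refine ⟨h3, ?_, ?_⟩
    · rw [Function.iterate_succ_apply', h3, stepZ_Z0]
    · rw [show 3 * (q + 1) + 2 = (3 * (q + 1) + 1) + 1 by ring, Function.iterate_succ_apply',
        Function.iterate_succ_apply', h3, stepZ_Z0, stepZ_Z1]

lemma int_eq_of_cast (x y : Int) (hx0 : 0 ≤ x) (hx1 : x < MODI) (hy0 : 0 ≤ y) (hy1 : y < MODI)
    (h : (x : Zp) = (y : Zp)) : x = y := by
  have hz : ((x - y : Int) : Zp) = 0 := by push_cast; rw [h]; ring
  have hdvd := (ZMod.intCast_zmod_eq_zero_iff_dvd (x - y) 998244353).mp hz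
  have hM : MODI = 998244353 := rfl
  rw [hM] at hx1 hy1
  omega

lemma allEq_of_short (cs : List Char) (h : cs.length ≤ 1) : pyAllEqAdj cs = true := by
  match cs with
  | [] => rfl
  | [a] => rfl
  | a :: b :: t => simp at h

-- ===== VERDICT (by name: the statement is the Claim_ definition above) =====
set_option maxHeartbeats 2000000 in
theorem solve_spec : Claim_equal_solve := by
  intro s _
  show solve s = solve_alt s
  unfold solve solve_alt
  by_cases h1 : pyAllEqAdj s.toList = true
  · simp [h1]
  by_cases h2 : s.toList.length = 2
  · simp [h1, h2]
  by_cases h3 : s.toList.length = 3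
  · simp [h1, h2, h3]
  simp only [h1, h2, h3, if_false, Bool.false_eq_true]
  have hlen : 4 ≤ s.toList.length := by
    have h4 : ¬ s.toList.length ≤ 1 := fun hle => h1 (allEq_of_short _ hle)
    omega
  set cs := s.toList with hcs
  set m := cs.length - 1 with hm
  set k := PySem.Int.mod (sumOrds cs) 3 with hk
  have hk3 : k = 0 ∨ k = 1 ∨ k = 2 := by
    have ha := PySem.Int.mod_nonneg (sumOrds cs) (b := 3) (by norm_num)
    have hb := PySem.Int.mod_lt (sumOrds cs) (b := 3) (by norm_num)
    omega
  have hMpos : (0 : Int) < MODI := by unfold MODI; norm_num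
  apply int_eq_of_cast _ _ (PySem.Int.mod_nonneg _ hMpos) (PySem.Int.mod_lt _ hMpos)
    (PySem.Int.mod_nonneg _ hMpos) (PySem.Int.mod_lt _ hMpos)
  rw [castmod, castmod]
  have hdpz : dpToZ (List.foldl (fun d _ => stepA d) dpInit (List.range m)) =
      stepZ^[m] (dpToZ dpInit) := by rw [foldl_stepA]; exact toZ_iter m dpInit
  obtain ⟨q, r, hr, hqr⟩ : ∃ q r, r < 3 ∧ m = 3 * q + r :=
    ⟨m / 3, m % 3, Nat.mod_lt _ (by norm_num), (Nat.div_add_mod m 3).symm⟩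
  have hmod3 : m % 3 = r := by omega
  have e3 : (27 : Zp) ^ q = 3 ^ (3 * q) := by rw [pow_mul]; norm_num
  have e2 : ((2 : Zp) ^ q) ^ 3 = 2 ^ (3 * q) := by rw [mul_comm, ← pow_mul]
  have hb0 : (((List.foldl (fun d x => stepA d) dpInit (List.range m)).b0 : Int) : Zp) =
      (stepZ^[m] (dpToZ dpInit)).b0 := by rw [← hdpz]; rfl
  have hb1 : (((List.foldl (fun d x => stepA d) dpInit (List.range m)).b1 : Int) : Zp) =
      (stepZ^[m] (dpToZ dpInit)).b1 := by rw [← hdpz]; rfl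
  have hb2 : (((List.foldl (fun d x => stepA d) dpInit (List.range m)).b2 : Int) : Zp) =
      (stepZ^[m] (dpToZ dpInit)).b2 := by rw [← hdpz]; rfl
  have F0 := (iterZ_formula q).1
  have F1 := (iterZ_formula q).2.1
  have F2 := (iterZ_formula q).2.2
  have hdd : (3 * q + 2 - 2) / 3 = q := by omega
  rcases (by omega : r = 0 ∨ r = 1 ∨ r = 2) with rfl | rfl | rfl
  · have G : stepZ^[m] (dpToZ dpInit) = Z0 q := by rw [hqr, Nat.add_zero]; exact F0
    rw [G] at hb0 hb1 hb2
    simp only [hmod3]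
    split_ifs <;>
      first
      | contradiction
      | omega
      | (push_cast
         simp only [hb0, hb1, hb2, powMod_cast, Z0]
         rw [hqr]
         simp only [Nat.add_zero, e3, e2]
         push_cast
         ring)
  · have G : stepZ^[m] (dpToZ dpInit) = Z1 q := by rw [hqr]; exact F1
    rw [G] at hb0 hb1 hb2
    simp only [hmod3]
    split_ifs <;>
      first
      | contradiction
      | omega
      | (push_cast
         simp only [hb0, hb1, hb2, powMod_cast, Z1]
         rw [hqr]
         simp only [pow_add, pow_one, e3, e2]
         push_cast
         ring)
  · have G : stepZ^[m] (dpToZ dpInit) = Z2 q := by rw [hqr]; exact F2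
    rw [G] at hb0 hb1 hb2
    simp only [hmod3]
    split_ifs <;>
      first
      | contradiction
      | omega
      | (push_cast
         simp only [hb0, hb1, hb2, powMod_cast, Z2]
         rw [hqr]
         simp only [hdd, pow_add, e3, e2]
         push_cast
         ring)
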